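-- pv_equiv track=rewrite | github.com/persquare/python3.tmbundle | Support/lib/TextMate/help_gen.py | parse_keycode
-- ===== SOURCE A (Python) =====
-- def parse_keycode(keycode):
--     # a => A
--     # A => ⇧A
--     # ~ => ⌥
--     # ^ => ⌃
--     # @ => ⌘
--     # $ ⌅ ⎋ ⇥
--     # *
--     mappings = {
--         '~':'⌥',
--         '^':'⌃',
--         '@':'⌘',
--         '\x0A':'↩',
--         '\x09':'⇥',
--         '\x1B':'⎋',
--         ' ':'␣'
--     }
--     printable = []
--     shifted = False
--     keycode = list(keycode)
--     key = keycode.pop() # .decode('utf-8')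
--     key = mappings.get(key, key)
--     printable.append(key.upper())
--     if key >= 'A' and key <= 'Z':
--         shifted = True
--
--     while keycode:
--         key = keycode.pop() # .decode('utf-8')
--         printable.append(mappings.get(key, '¿'))
--
--     if shifted:
--         printable.append('⇧')
--
--     printable.reverse()
--
--     return printable
-- ===== SOURCE B (Python) =====
-- def parse_keycode(keycode):
--     mappings = {
--         '~': '\u2325', '^': '\u2303', '@': '\u2318',
--         '\x0A': '\u21a9', '\x09': '\u21e5', '\x1B': '\u238b', ' ': '\u2423',
--     }
--     last = keycode[-1]
--     key = mappings.get(last, last)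
--     result = ['\u21e7'] if 'A' <= key <= 'Z' else []
--     result.extend(mappings.get(c, '\u00bf') for c in keycode[:-1])
--     result.append(key.upper())
--     return result
-- ===== Notes on version B (the rewrite author's own statement) =====
-- stated objective: simpler
-- what changed: B builds the result forward in one pass (shift flag first, then a comprehension over keycode[:-1], then the final key) instead of A's pop-from-the-end stack loop followed by a reverse.
import Mathlib
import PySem

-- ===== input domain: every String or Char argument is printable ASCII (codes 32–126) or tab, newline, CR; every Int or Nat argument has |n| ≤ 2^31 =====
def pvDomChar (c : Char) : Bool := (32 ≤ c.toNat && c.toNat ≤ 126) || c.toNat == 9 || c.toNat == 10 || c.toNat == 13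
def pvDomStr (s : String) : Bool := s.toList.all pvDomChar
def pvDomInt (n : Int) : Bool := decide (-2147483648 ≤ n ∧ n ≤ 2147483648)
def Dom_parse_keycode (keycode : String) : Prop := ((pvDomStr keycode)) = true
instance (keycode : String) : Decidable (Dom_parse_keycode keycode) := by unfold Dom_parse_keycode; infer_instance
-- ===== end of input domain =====

-- B builds the list forward (shift marker, mapped prefix, uppercased key) instead of A's
-- pop-and-reverse stack construction: simpler decomposition, same O(n) cost.
-- Pre_ excludes only the empty string, on which A raises IndexError (list.pop of []).

-- ===== PORT A =====
-- the `mappings` dict, shared verbatim by both programs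
def kcMappings : PySem.Dict Char Char :=
  (((((((PySem.Dict.empty).insert '~' '⌥').insert '^' '⌃').insert '@' '⌘').insert
      '\n' '↩').insert '\t' '⇥').insert (Char.ofNat 27) '⎋').insert ' ' '␣'

-- the `while keycode:` pop loop of A
def kcPopLoop (xs : List Char) (printable : List String) : List String :=
  match _h : PySem.List.pop? xs (-1) with
  | none => printable
  | some (k, rest) => kcPopLoop rest (printable ++ [String.ofList [kcMappings.getD k '¿']])
termination_by xs.length
decreasing_by
  have h2 := PySem.List.length_of_pop?_eq_some xs _h; simp at h2; omega

def parse_keycode (keycode : String) : List String :=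
  match PySem.List.pop? keycode.toList (-1) with
  | none => []  -- empty keycode: Python raises IndexError; excluded by Pre_
  | some (k0, rest) =>
    let key := kcMappings.getD k0 k0
    let printable : List String := [String.ofList [PySem.Chars.upperChar key]]
    let shifted : Bool := decide ('A' ≤ key ∧ key ≤ 'Z')
    let printable := kcPopLoop rest printable
    let printable := if shifted then printable ++ ["⇧"] else printable
    printable.reverse

-- ===== PORT B =====
def parse_keycode_alt (keycode : String) : List String :=
  match PySem.List.pyGet? keycode.toList (-1) with
  | none => []  -- empty keycode: Python raises IndexError; excluded by Pre_
  | some last =>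
    let key := kcMappings.getD last last
    let result : List String := if 'A' ≤ key ∧ key ≤ 'Z' then ["⇧"] else []
    let result := result ++
      (PySem.List.slice keycode.toList none (some (-1))).map
        (fun c => String.ofList [kcMappings.getD c '¿'])
    result ++ [String.ofList [PySem.Chars.upperChar key]]

-- ===== PRECONDITION & SPEC =====
-- Pre_ excludes exactly the empty string, on which A raises IndexError.
def Pre_parse_keycode (keycode : String) : Prop := keycode.toList ≠ []
instance (keycode : String) : Decidable (Pre_parse_keycode keycode) := by
  unfold Pre_parse_keycode; infer_instance

def pvWitness_parse_keycode : String := "@a"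

def Spec_parse_keycode (keycode : String) (out : List String) : Prop := out = parse_keycode_alt keycode
instance (keycode : String) (out : List String) : Decidable (Spec_parse_keycode keycode out) := by unfold Spec_parse_keycode; infer_instance

-- ===== CLAIM (what is proved, stated in full; the proofs are below) =====
def Claim_equal_parse_keycode : Prop := ∀ (keycode : String), Dom_parse_keycode keycode → Pre_parse_keycode keycode → Spec_parse_keycode keycode (parse_keycode keycode)

-- ===== LEMMAS AND PROOFS =====
theorem kcPopLoop_nil (acc : List String) : kcPopLoop [] acc = acc := by
  rw [kcPopLoop.eq_def]
  split
  · rfl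
  · next h => simp [PySem.List.pop?, PySem.List.pyIdx?] at h

theorem kcPopLoop_concat (ys : List Char) (y : Char) (acc : List String) :
    kcPopLoop (ys ++ [y]) acc = kcPopLoop ys (acc ++ [String.ofList [kcMappings.getD y '¿']]) := by
  rw [kcPopLoop.eq_def]
  split
  · next h => rw [PySem.List.pop?_last] at h; cases h
  · next k rest h =>
    rw [PySem.List.pop?_last] at h
    cases h
    rfl

theorem kcPopLoop_eq (xs : List Char) (acc : List String) :
    kcPopLoop xs acc = acc ++ xs.reverse.map (fun c => String.ofList [kcMappings.getD c '¿']) := by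
  induction xs using List.reverseRecOn generalizing acc with
  | nil => simp [kcPopLoop_nil]
  | append_singleton ys y ih => rw [kcPopLoop_concat]; simp [ih]

theorem parse_keycode_spec : Claim_equal_parse_keycode := by
  intro keycode _ hpre
  unfold Spec_parse_keycode parse_keycode parse_keycode_alt
  obtain ⟨ys, k0, hsplit⟩ : ∃ ys k0, keycode.toList = ys ++ [k0] := by
    rcases List.eq_nil_or_concat keycode.toList with h | ⟨ys, k0, h⟩
    · exact absurd h hpre
    · exact ⟨ys, k0, by simpa using h⟩
  rw [hsplit, PySem.List.pop?_last, PySem.List.pyGet?_neg_one_append_singleton,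
    PySem.List.slice_to_neg_one]
  simp only [kcPopLoop_eq, List.dropLast_concat]
  split_ifs with h1 h2 h2 <;> simp_all
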